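-- pv_equiv track=rewrite | github.com/UmutAcarLab/oac | pyzxrunner.py | lopt_voqc
-- ===== SOURCE A (Python) =====
-- def lopt_voqc (path, bench_name, suffix):
-- 	cpath = path + bench_name
-- 	suffix+=".lopt"
-- 	wtcomb = "voqc"
-- 	options = {
-- 			'timeout': 3600*3,
-- 			# 'wtcomb': wtcomb,
-- 			'size': 40,
-- 			'nopp': '',
-- 			# 'rl': '',
-- 			'greedyonly': '',
-- 			'circuit' : cpath + ".qasm",
-- 			'outfile' : cpath + suffix + "." + wtcomb + ".output",
-- 			'logfile' : cpath + suffix + "." + wtcomb + ".log"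
-- 	}
-- 	command = './bin/ct2.mlton.voqc.bin'
--
-- 	for option, value in options.items():
-- 		if value:
-- 				command += ' -{} {}'.format(option, value)
-- 		else:
-- 				command += ' -{}'.format(option)
--
-- 	output_file = cpath + "." + wtcomb + ".trash.out"
-- 	command += ' > {}'.format(output_file)
-- # command += ' > {}'.format(output_file)
--
-- 	return command
-- ===== SOURCE B (Python) =====
-- def lopt_voqc(path, bench_name, suffix):
--     # B: all option values are constants, so emit the command as one direct concatenation.
--     cpath = path + bench_name
--     return ('./bin/ct2.mlton.voqc.bin -timeout 10800 -size 40 -nopp -greedyonly'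
--             ' -circuit ' + cpath + '.qasm'
--             ' -outfile ' + cpath + suffix + '.lopt.voqc.output'
--             ' -logfile ' + cpath + suffix + '.lopt.voqc.log'
--             ' > ' + cpath + '.voqc.trash.out')
-- ===== Notes on version B (the rewrite author's own statement) =====
-- stated objective: simpler
-- what changed: Drops the options dict and the truthiness loop entirely and emits the command as one direct string concatenation, since every option value is a compile-time constant.
import Mathlib
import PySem

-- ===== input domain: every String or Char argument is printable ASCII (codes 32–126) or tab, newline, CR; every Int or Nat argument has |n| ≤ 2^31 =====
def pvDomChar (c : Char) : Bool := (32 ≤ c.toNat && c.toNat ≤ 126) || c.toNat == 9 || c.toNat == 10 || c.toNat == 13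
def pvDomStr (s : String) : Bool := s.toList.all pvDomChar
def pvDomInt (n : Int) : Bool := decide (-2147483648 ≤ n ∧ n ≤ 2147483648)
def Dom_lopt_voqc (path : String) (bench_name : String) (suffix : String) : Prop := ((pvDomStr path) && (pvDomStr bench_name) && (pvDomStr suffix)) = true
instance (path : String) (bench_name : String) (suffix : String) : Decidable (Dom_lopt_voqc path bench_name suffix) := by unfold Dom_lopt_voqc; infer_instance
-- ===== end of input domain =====

-- B replaces A's options dict and truthiness loop with one direct string concatenation (objective: simpler).


-- ===== PORT A =====
inductive PVal
  | i : Int → PVal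
  | s : String → PVal
deriving DecidableEq, Repr

-- Python truthiness of a dict value (nonzero int / nonempty string)
def PVal.truthy : PVal → Bool
  | .i n => n != 0
  | .s v => v != ""

-- str.format of a dict value
def PVal.fmt : PVal → String
  | .i n => PySem.Int.toStr n
  | .s v => v

def lopt_voqc (path : String) (bench_name : String) (suffix : String) : String :=
  let cpath := path ++ bench_name
  let suffix := suffix ++ ".lopt"
  let wtcomb := "voqc"
  let options : List (String × PVal) :=
    [("timeout", .i (3600*3)), ("size", .i 40), ("nopp", .s ""), ("greedyonly", .s ""),
     ("circuit", .s (cpath ++ ".qasm")),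
     ("outfile", .s (cpath ++ suffix ++ "." ++ wtcomb ++ ".output")),
     ("logfile", .s (cpath ++ suffix ++ "." ++ wtcomb ++ ".log"))]
  let command := "./bin/ct2.mlton.voqc.bin"
  let command := options.foldl (fun cmd p =>
    if p.2.truthy then cmd ++ " -" ++ p.1 ++ " " ++ p.2.fmt
    else cmd ++ " -" ++ p.1) command
  let output_file := cpath ++ "." ++ wtcomb ++ ".trash.out"
  command ++ " > " ++ output_file

-- ===== PORT B =====
-- B: one direct concatenation, no dict/loop (simpler)
def lopt_voqc_alt (path : String) (bench_name : String) (suffix : String) : String :=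
  let cpath := path ++ bench_name
  "./bin/ct2.mlton.voqc.bin -timeout 10800 -size 40 -nopp -greedyonly" ++
  " -circuit " ++ cpath ++ ".qasm" ++
  " -outfile " ++ cpath ++ suffix ++ ".lopt.voqc.output" ++
  " -logfile " ++ cpath ++ suffix ++ ".lopt.voqc.log" ++
  " > " ++ cpath ++ ".voqc.trash.out"

-- ===== PRECONDITION & SPEC =====
def Spec_lopt_voqc (path : String) (bench_name : String) (suffix : String) (out : String) : Prop := out = lopt_voqc_alt path bench_name suffix
instance (path : String) (bench_name : String) (suffix : String) (out : String) : Decidable (Spec_lopt_voqc path bench_name suffix out) := by unfold Spec_lopt_voqc; infer_instance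

-- ===== CLAIM (what is proved, stated in full; the proofs are below) =====
def Claim_equal_lopt_voqc : Prop := ∀ (path : String) (bench_name : String) (suffix : String), Dom_lopt_voqc path bench_name suffix → Spec_lopt_voqc path bench_name suffix (lopt_voqc path bench_name suffix)

-- ===== LEMMAS AND PROOFS =====

-- ===== VERDICT (by name: the statement is the Claim_ definition above) =====
theorem lopt_voqc_spec : Claim_equal_lopt_voqc := by
  intro path bench_name suffix _
  unfold Spec_lopt_voqc lopt_voqc lopt_voqc_alt
  simp [PVal.truthy, PVal.fmt, PySem.Int.toStr]
  apply String.ext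
  simp [show PySem.Int.toChars 10800 = ['1','0','8','0','0'] from by decide,
        show PySem.Int.toChars 40 = ['4','0'] from by decide]
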